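-- pv_equiv track=rewrite | github.com/sm2774us/competitive_programming | Graph/023_leetcode_P_1319_NumberOfOperationsToMakeNetworkConnected/Solution.py | makeConnectedUsingUnionFind
-- ===== SOURCE A (Python) =====
-- from typing import List
--
-- class DisjointSetUnion(object):
--     def __init__(self, size):
--         self.rank = [0] * size
--         self.parent = [i for i in range(size)]
--
--     def find(self, val):
--         if self.parent[val] != val:
--             self.parent[val] = self.find(self.parent[val])
--         return self.parent[val]
--
--     def union(self, u, v):
--         root_u, root_v = self.find(u), self.find(v)
--         rank_u = self.rank[root_u]
--         rank_v = self.rank[root_v]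
--
--         if rank_u == rank_v:
--             rank_u += 1
--             self.parent[root_v] = root_u
--         elif rank_u > rank_v:
--             self.parent[root_v] = root_u
--         else:
--             self.parent[root_u] = root_v
--
-- def makeConnectedUsingUnionFind(n: int, connections: List[List[int]]) -> int:
--
--     if len(connections) < n - 1:
--         return -1
--
--     dsu = DisjointSetUnion(n)
--     for connection in connections:
--         u, v = connection
--         dsu.union(u, v)
--
--     # count number of connected components by counting distinct val
--     connected_components = set()
--     for node in range(n):
--         component = dsu.find(node)  # find the set number it belones to
--         connected_components.add(component)
--
--     return len(connected_components) - 1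
-- ===== SOURCE B (Python) =====
-- def makeConnectedUsingUnionFind(n, connections):
--     if len(connections) < n - 1:
--         return -1
--     # component labelling with smaller-into-larger merging:
--     # comp[i] is the label of i's component, members maps a label to its nodes
--     comp = list(range(n))
--     members = {i: [i] for i in range(n)}
--     for u, v in connections:
--         cu, cv = comp[u], comp[v]
--         if cu != cv:
--             if len(members[cu]) < len(members[cv]):
--                 cu, cv = cv, cu
--             moved = members.pop(cv)
--             for x in moved:
--                 comp[x] = cu
--             members[cu].extend(moved)
--     return len(members) - 1
-- ===== Notes on version B (the rewrite author's own statement) =====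
-- stated objective: alternative
-- what changed: Replaces the recursive union-find (path compression; the rank update is dead code in A) by an explicit component-labelling algorithm: a label array plus a label->members dict, merging the smaller class into the larger by relabelling its members, returning len(members)-1.
-- outside the precondition, e.g. on makeConnectedUsingUnionFind(2, [[0, -1]]): A returns 0, B returns 0
import Mathlib
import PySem

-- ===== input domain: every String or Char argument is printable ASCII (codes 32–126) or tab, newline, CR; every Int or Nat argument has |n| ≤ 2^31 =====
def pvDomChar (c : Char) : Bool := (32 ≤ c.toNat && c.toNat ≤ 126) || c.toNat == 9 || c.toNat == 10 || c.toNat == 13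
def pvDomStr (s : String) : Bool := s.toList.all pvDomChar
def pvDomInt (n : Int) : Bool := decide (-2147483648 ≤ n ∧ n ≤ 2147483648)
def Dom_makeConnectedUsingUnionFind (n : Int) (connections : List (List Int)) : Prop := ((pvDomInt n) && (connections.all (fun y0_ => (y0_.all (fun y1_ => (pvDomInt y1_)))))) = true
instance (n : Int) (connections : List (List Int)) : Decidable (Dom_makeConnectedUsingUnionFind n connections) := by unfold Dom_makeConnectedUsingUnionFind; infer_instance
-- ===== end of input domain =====

-- B replaces the recursive union–find (path compression, dead rank field) by component
-- relabelling with smaller-into-larger merging; alternative algorithm, comparable cost.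


-- ===== PORT A =====
-- DisjointSetUnion.find: Python recursion rendered with explicit fuel; the fuel the
-- callers pass (length of parent + 1) is proved sufficient for every input Pre_ admits.
def pvFind : Nat → List Int → Int → Int × List Int
  | 0, parent, val => (val, parent)
  | fuel+1, parent, val =>
    let pv := PySem.List.pyGetD parent val val   -- self.parent[val] (in range under Pre_)
    if pv ≠ val then
      let rp := pvFind fuel parent pv            -- self.find(self.parent[val])
      let parent2 := PySem.List.pySetD rp.2 val rp.1   -- self.parent[val] = …
      (PySem.List.pyGetD parent2 val val, parent2)     -- return self.parent[val]
    else (val, parent)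

-- DisjointSetUnion.union (rank_u += 1 in the Python is a local variable: self.rank never changes)
def pvUnion (fuel : Nat) (rank : List Int) (parent : List Int) (u v : Int) : List Int :=
  let fu := pvFind fuel parent u
  let fv := pvFind fuel fu.2 v
  let rank_u := PySem.List.pyGetD rank fu.1 0
  let rank_v := PySem.List.pyGetD rank fv.1 0
  if rank_u = rank_v then PySem.List.pySetD fv.2 fv.1 fu.1
  else if rank_u > rank_v then PySem.List.pySetD fv.2 fv.1 fu.1
  else PySem.List.pySetD fv.2 fu.1 fv.1

-- one turn of the final counting loop: component = dsu.find(node); connected_components.add(component)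
def pvFindStep (st : PySem.Set Int × List Int) (node : Int) : PySem.Set Int × List Int :=
  let fr := pvFind (st.2.length + 1) st.2 node
  (PySem.Set.add st.1 fr.1, fr.2)

def makeConnectedUsingUnionFind (n : Int) (connections : List (List Int)) : Int :=
  if PySem.List.len connections < n - 1 then -1
  else
    let rank : List Int := List.replicate n.toNat 0        -- [0] * size
    let parent0 : List Int := PySem.List.pyRange 0 n 1     -- [i for i in range(size)]
    let parent := connections.foldl (fun p c =>
      let u := PySem.List.pyGetD c 0 0                     -- u, v = connection
      let v := PySem.List.pyGetD c 1 0
      pvUnion (p.length + 1) rank p u v) parent0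
    let fin := (PySem.List.pyRange 0 n 1).foldl pvFindStep (PySem.Set.empty, parent)
    (fin.1.length : Int) - 1

-- ===== PORT B =====
-- one turn of B's edge loop; members.pop(cv) is rendered as getD + erase
def pvAltStep (st : List Int × PySem.Dict Int (List Int)) (c : List Int) :
    List Int × PySem.Dict Int (List Int) :=
  let u := PySem.List.pyGetD c 0 0                   -- for u, v in connections
  let v := PySem.List.pyGetD c 1 0
  let cu := PySem.List.pyGetD st.1 u 0               -- cu, cv = comp[u], comp[v]
  let cv := PySem.List.pyGetD st.1 v 0
  if cu ≠ cv then
    let lcu := st.2.getD cu []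
    let lcv := st.2.getD cv []
    let pr := if lcu.length < lcv.length then (cv, cu) else (cu, cv)  -- cu, cv = cv, cu
    let moved := st.2.getD pr.2 []                   -- moved = members.pop(cv)
    let members1 := st.2.erase pr.2
    let comp1 := moved.foldl (fun cmp x => PySem.List.pySetD cmp x pr.1) st.1
    (comp1, members1.modify pr.1 [] (· ++ moved))    -- members[cu].extend(moved)
  else st

def makeConnectedUsingUnionFind_alt (n : Int) (connections : List (List Int)) : Int :=
  if PySem.List.len connections < n - 1 then -1
  else
    let st := connections.foldl pvAltStep
      (PySem.List.pyRange 0 n 1,                           -- comp = list(range(n))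
       (PySem.List.pyRange 0 n 1).foldl (fun d i => d.insert i [i]) PySem.Dict.empty)
    ((st.2.size : Int)) - 1                                -- len(members) - 1

-- ===== PRECONDITION & SPEC =====
-- Pre_ is the natural domain: either the early guard fires (too few edges: both programs
-- return -1 before touching the edges) or every connection is a pair of node labels in
-- range(n).  Past the guard it excludes inputs where A raises (connections not of length
-- 2: ValueError; labels < -n or ≥ n: IndexError) and negative labels, on which both
-- programs only return a value through Python's accidental negative-index wraparound.
def Pre_makeConnectedUsingUnionFind (n : Int) (connections : List (List Int)) : Prop :=
  PySem.List.len connections < n - 1 ∨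
    ∀ c ∈ connections, c.length = 2 ∧ ∀ x ∈ c, 0 ≤ x ∧ x < n
instance (n : Int) (connections : List (List Int)) : Decidable (Pre_makeConnectedUsingUnionFind n connections) := by unfold Pre_makeConnectedUsingUnionFind; infer_instance

def pvWitness_makeConnectedUsingUnionFind : Int × List (List Int) := (3, [[0, 1], [1, 2]])

def Spec_makeConnectedUsingUnionFind (n : Int) (connections : List (List Int)) (out : Int) : Prop := out = makeConnectedUsingUnionFind_alt n connections
instance (n : Int) (connections : List (List Int)) (out : Int) : Decidable (Spec_makeConnectedUsingUnionFind n connections out) := by unfold Spec_makeConnectedUsingUnionFind; infer_instance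

-- ===== CLAIM (what is proved, stated in full; the proofs are below) =====
def Claim_equal_makeConnectedUsingUnionFind : Prop := ∀ (n : Int) (connections : List (List Int)), Dom_makeConnectedUsingUnionFind n connections → Pre_makeConnectedUsingUnionFind n connections → Spec_makeConnectedUsingUnionFind n connections (makeConnectedUsingUnionFind n connections)

-- ===== LEMMAS AND PROOFS =====

-- ---- the parent array as a pointer graph ----
def pvStep (p : List Int) (j : Nat) : Nat := (p.getD j 0).toNat
def pvIsRoot (p : List Int) (j : Nat) : Prop := pvStep p j = j
def pvRoot (p : List Int) (j : Nat) : Nat := (pvStep p)^[p.length] j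
def pvBounds (p : List Int) : Prop := ∀ j, j < p.length → 0 ≤ p.getD j 0 ∧ pvStep p j < p.length
def pvDec (p : List Int) (d : Nat → Nat) : Prop := ∀ j, j < p.length → pvIsRoot p j ∨ d (pvStep p j) < d j
def pvInv (p : List Int) : Prop := pvBounds p ∧ ∃ d, pvDec p d

theorem pvIter_fixed {p : List Int} {j : Nat} (h : pvIsRoot p j) (k : Nat) :
    (pvStep p)^[k] j = j :=
  Function.iterate_fixed h k

theorem pvStab {p : List Int} {j k m : Nat} (h : pvIsRoot p ((pvStep p)^[k] j))
    (hkm : k ≤ m) : (pvStep p)^[m] j = (pvStep p)^[k] j := by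
  obtain ⟨t, rfl⟩ := Nat.exists_eq_add_of_le hkm
  rw [Nat.add_comm, Function.iterate_add_apply]
  exact pvIter_fixed h t

theorem pvIter_lt {p : List Int} (hb : pvBounds p) {j : Nat} (hj : j < p.length) (k : Nat) :
    (pvStep p)^[k] j < p.length := by
  induction k with
  | zero => exact hj
  | succ k ih => rw [Function.iterate_succ_apply']; exact (hb _ ih).2

theorem pvReach {p : List Int} {d : Nat → Nat} (hb : pvBounds p) (hd : pvDec p d)
    {j : Nat} (hj : j < p.length) : ∃ k, k < p.length ∧ pvIsRoot p ((pvStep p)^[k] j) := by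
  by_contra hcon
  push Not at hcon
  have hlt : ∀ k : Nat, (pvStep p)^[k] j < p.length := fun k => pvIter_lt hb hj k
  have hstep : ∀ k, k < p.length → d ((pvStep p)^[k+1] j) < d ((pvStep p)^[k] j) := by
    intro k hk
    rcases hd _ (hlt k) with hr | hl
    · exact absurd hr (hcon k hk)
    · rw [Function.iterate_succ_apply']; exact hl
  have hanti : ∀ k1 k2, k1 < k2 → k2 ≤ p.length → d ((pvStep p)^[k2] j) < d ((pvStep p)^[k1] j) := by
    intro k1 k2 h12 h2
    induction k2 with
    | zero => omega
    | succ m ih =>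
      rcases Nat.lt_or_ge k1 m with hm | hm
      · exact Nat.lt_trans (hstep m (by omega)) (ih hm (by omega))
      · have : k1 = m := by omega
        subst this
        exact hstep k1 (by omega)
  have hinj : Function.Injective (fun k : Fin (p.length + 1) => (⟨(pvStep p)^[k.1] j, hlt k.1⟩ : Fin p.length)) := by
    intro k1 k2 hEq
    simp only [Fin.mk.injEq] at hEq
    by_contra hne
    rcases Nat.lt_or_ge k1.1 k2.1 with h | h
    · have := hanti k1.1 k2.1 h (by omega)
      rw [hEq] at this; omega
    · have hlt2 : k2.1 < k1.1 := by
        rcases Nat.lt_or_ge k2.1 k1.1 with h' | h'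
        · exact h'
        · exact absurd (Fin.ext (by omega)) hne
      have := hanti k2.1 k1.1 hlt2 (by omega)
      rw [hEq] at this; omega
  have := Fintype.card_le_of_injective _ hinj
  simp at this

theorem pvRoot_isRoot {p : List Int} (h : pvInv p) {j : Nat} (hj : j < p.length) :
    pvIsRoot p (pvRoot p j) := by
  obtain ⟨hb, d, hd⟩ := h
  obtain ⟨k, hk, hr⟩ := pvReach hb hd hj
  unfold pvRoot
  rw [pvStab hr (Nat.le_of_lt hk)]
  exact hr

theorem pvRoot_lt {p : List Int} (h : pvInv p) {j : Nat} (hj : j < p.length) :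
    pvRoot p j < p.length := pvIter_lt h.1 hj _

theorem pvRoot_of_isRoot {p : List Int} {j : Nat} (h : pvIsRoot p j) : pvRoot p j = j :=
  pvIter_fixed h _

theorem pvRoot_step {p : List Int} (h : pvInv p) {j : Nat} (hj : j < p.length) :
    pvRoot p (pvStep p j) = pvRoot p j := by
  obtain ⟨hb, d, hd⟩ := h
  obtain ⟨k, hk, hr⟩ := pvReach hb hd hj
  unfold pvRoot
  rw [← Function.iterate_succ_apply]
  rw [pvStab hr (Nat.le_of_lt hk), ← pvStab hr (Nat.le_succ_of_le (Nat.le_of_lt hk)),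
    Function.iterate_succ_apply]

theorem pvD_root_lt {p : List Int} {d : Nat → Nat} (hb : pvBounds p) (hd : pvDec p d)
    {j : Nat} (hj : j < p.length) (hne : ¬ pvIsRoot p j) : d (pvRoot p j) < d j := by
  have hlt : ∀ k : Nat, (pvStep p)^[k] j < p.length := fun k => pvIter_lt hb hj k
  have mono : ∀ m, d ((pvStep p)^[m+1] j) ≤ d ((pvStep p)^[m] j) := by
    intro m
    rcases hd _ (hlt m) with hr | hl
    · rw [Function.iterate_succ_apply', hr]
    · rw [Function.iterate_succ_apply']; exact Nat.le_of_lt hl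
  have anti : ∀ m, 1 ≤ m → d ((pvStep p)^[m] j) ≤ d ((pvStep p)^[1] j) := by
    intro m hm
    induction m with
    | zero => omega
    | succ k ih =>
      rcases Nat.lt_or_ge 0 k with hk | hk
      · exact Nat.le_trans (mono k) (ih hk)
      · have : k = 0 := by omega
        subst this; exact Nat.le_refl _
  have hstrict : d ((pvStep p)^[1] j) < d j := by
    rcases hd j hj with hr | hl
    · exact absurd hr hne
    · simpa using hl
  have hL : 1 ≤ p.length := by omega
  exact Nat.lt_of_le_of_lt (anti p.length hL) hstrict

theorem pvGetD_set {p : List Int} {i : Nat} (hi : i < p.length) (w : Int) (j : Nat) :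
    (p.set i w).getD j 0 = if j = i then w else p.getD j 0 := by
  rcases eq_or_ne j i with rfl | h
  · simp [List.getD_eq_getElem?_getD, hi]
  · simp [List.getD_eq_getElem?_getD, List.getElem?_set, h, Ne.symm h]

theorem pvStep_set {p : List Int} {i : Nat} (hi : i < p.length) (r : Nat) (j : Nat) :
    pvStep (p.set i ((r : Nat) : Int)) j = if j = i then r else pvStep p j := by
  unfold pvStep
  rw [pvGetD_set hi]
  rcases eq_or_ne j i with rfl | h
  · simp
  · simp [h]

-- setting a pointer to (a root of its own chain, resp. joining two roots) keeps the invariant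
theorem pvSet_compress {p : List Int} (h : pvInv p) {i : Nat} (hi : i < p.length) :
    pvInv (p.set i ((pvRoot p i : Nat) : Int)) ∧
    (∀ a, a < p.length → pvRoot (p.set i ((pvRoot p i : Nat) : Int)) a = pvRoot p a) := by
  obtain ⟨hb, d, hd⟩ := h
  have hInv : pvInv p := ⟨hb, d, hd⟩
  have hrlt : pvRoot p i < p.length := pvRoot_lt hInv hi
  have hrroot : pvIsRoot p (pvRoot p i) := pvRoot_isRoot hInv hi
  have hqlen : (p.set i ((pvRoot p i : Nat) : Int)).length = p.length := List.length_set
  have hstepq : ∀ j, pvStep (p.set i ((pvRoot p i : Nat) : Int)) j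
      = if j = i then pvRoot p i else pvStep p j := pvStep_set hi (pvRoot p i)
  have hbq : pvBounds (p.set i ((pvRoot p i : Nat) : Int)) := by
    intro j hj
    rw [hqlen] at hj
    refine ⟨?_, ?_⟩
    · rw [pvGetD_set hi]
      split
      · exact Int.natCast_nonneg _
      · exact (hb j hj).1
    · rw [hstepq, hqlen]
      split
      · exact hrlt
      · exact (hb j hj).2
  have hdq : pvDec (p.set i ((pvRoot p i : Nat) : Int)) d := by
    intro j hj
    rw [hqlen] at hj
    rcases eq_or_ne j i with rfl | hne
    · by_cases hroot : pvIsRoot p j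
      · left
        unfold pvIsRoot
        rw [hstepq, if_pos rfl, pvRoot_of_isRoot hroot]
      · right
        rw [hstepq, if_pos rfl]
        exact pvD_root_lt hb hd hj hroot
    · rcases hd j hj with hroot | hlt
      · left
        unfold pvIsRoot at *
        rw [hstepq, if_neg hne]
        exact hroot
      · right
        rw [hstepq, if_neg hne]
        exact hlt
  have hInvq : pvInv (p.set i ((pvRoot p i : Nat) : Int)) := ⟨hbq, d, hdq⟩
  refine ⟨hInvq, ?_⟩
  have key : ∀ m a, a < p.length → d a ≤ m →
      pvRoot (p.set i ((pvRoot p i : Nat) : Int)) a = pvRoot p a := by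
    intro m
    induction m with
    | zero =>
      intro a ha hda
      rcases eq_or_ne a i with rfl | hne
      · by_cases hroot : pvIsRoot p a
        · have hri : pvRoot p a = a := pvRoot_of_isRoot hroot
          have : pvIsRoot (p.set a ((pvRoot p a : Nat) : Int)) a := by
            unfold pvIsRoot; rw [hstepq, if_pos rfl, hri]
          rw [pvRoot_of_isRoot this, hri]
        · exact absurd (pvD_root_lt hb hd ha hroot) (by omega)
      · by_cases hroot : pvIsRoot p a
        · have : pvIsRoot (p.set i ((pvRoot p i : Nat) : Int)) a := by
            unfold pvIsRoot at *; rw [hstepq, if_neg hne]; exact hroot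
          rw [pvRoot_of_isRoot this, pvRoot_of_isRoot hroot]
        · rcases hd a ha with h' | h'
          · exact absurd h' hroot
          · omega
    | succ m ih =>
      intro a ha hda
      rcases eq_or_ne a i with rfl | hne
      · by_cases hroot : pvIsRoot p a
        · have hri : pvRoot p a = a := pvRoot_of_isRoot hroot
          have : pvIsRoot (p.set a ((pvRoot p a : Nat) : Int)) a := by
            unfold pvIsRoot; rw [hstepq, if_pos rfl, hri]
          rw [pvRoot_of_isRoot this, hri]
        · have hrne : pvRoot p a ≠ a := by
            intro hcon
            have h' := hrroot
            rw [hcon] at h'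
            exact hroot h' 
          have h1 : pvRoot (p.set a ((pvRoot p a : Nat) : Int)) a
              = pvRoot (p.set a ((pvRoot p a : Nat) : Int)) (pvRoot p a) := by
            rw [← pvRoot_step hInvq (by rw [hqlen]; exact ha), hstepq, if_pos rfl]
          have h2 : pvIsRoot (p.set a ((pvRoot p a : Nat) : Int)) (pvRoot p a) := by
            unfold pvIsRoot at *; rw [hstepq, if_neg hrne]; exact hrroot
          rw [h1, pvRoot_of_isRoot h2]
      · by_cases hroot : pvIsRoot p a
        · have : pvIsRoot (p.set i ((pvRoot p i : Nat) : Int)) a := by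
            unfold pvIsRoot at *; rw [hstepq, if_neg hne]; exact hroot
          rw [pvRoot_of_isRoot this, pvRoot_of_isRoot hroot]
        · have hdlt : d (pvStep p a) < d a := by
            rcases hd a ha with h' | h'
            · exact absurd h' hroot
            · exact h'
          have hslt : pvStep p a < p.length := (hb a ha).2
          have h1 : pvRoot (p.set i ((pvRoot p i : Nat) : Int)) a
              = pvRoot (p.set i ((pvRoot p i : Nat) : Int)) (pvStep p a) := by
            rw [← pvRoot_step hInvq (by rw [hqlen]; exact ha), hstepq, if_neg hne]
          rw [h1, ih _ hslt (by omega), pvRoot_step hInv ha]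
  intro a ha
  exact key (d a) a ha (Nat.le_refl _)

theorem pvSet_join {p : List Int} (h : pvInv p) {ru rv : Nat}
    (hru : ru < p.length) (hrv : rv < p.length)
    (hr1 : pvIsRoot p ru) (hr2 : pvIsRoot p rv) :
    pvInv (p.set rv ((ru : Nat) : Int)) ∧
    (∀ a, a < p.length → pvRoot (p.set rv ((ru : Nat) : Int)) a =
      if pvRoot p a = rv then ru else pvRoot p a) := by
  obtain ⟨hb, d, hd⟩ := h
  have hInv : pvInv p := ⟨hb, d, hd⟩
  have hqlen : (p.set rv ((ru : Nat) : Int)).length = p.length := List.length_set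
  have hstepq : ∀ j, pvStep (p.set rv ((ru : Nat) : Int)) j
      = if j = rv then ru else pvStep p j := pvStep_set hrv ru
  have hbq : pvBounds (p.set rv ((ru : Nat) : Int)) := by
    intro j hj
    rw [hqlen] at hj
    refine ⟨?_, ?_⟩
    · rw [pvGetD_set hrv]
      split
      · exact Int.natCast_nonneg _
      · exact (hb j hj).1
    · rw [hstepq, hqlen]
      split
      · exact hru
      · exact (hb j hj).2
  have hdq : pvDec (p.set rv ((ru : Nat) : Int))
      (fun j => if pvRoot p j = rv then d j + d ru + 1 else d j) := by
    intro j hj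
    rw [hqlen] at hj
    rcases eq_or_ne j rv with rfl | hne
    · rcases eq_or_ne ru j with rfl | hner
      · left
        unfold pvIsRoot
        rw [hstepq, if_pos rfl]
      · right
        rw [hstepq, if_pos rfl]
        simp only
        rw [pvRoot_of_isRoot hr1, if_neg hner, pvRoot_of_isRoot hr2, if_pos rfl]
        omega
    · rcases hd j hj with hroot | hlt
      · left
        unfold pvIsRoot at *
        rw [hstepq, if_neg hne]
        exact hroot
      · right
        rw [hstepq, if_neg hne]
        simp only [pvRoot_step hInv hj]
        split <;> omega
  have hInvq : pvInv (p.set rv ((ru : Nat) : Int)) := ⟨hbq, _, hdq⟩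
  refine ⟨hInvq, ?_⟩
  have rootcase : ∀ a, a < p.length → pvIsRoot p a →
      pvRoot (p.set rv ((ru : Nat) : Int)) a = if pvRoot p a = rv then ru else pvRoot p a := by
    intro a ha hroot
    rcases eq_or_ne a rv with heq | hne
    · rw [heq] at hroot ⊢
      rcases eq_or_ne ru rv with hequ | hner
      · have hq2 : pvIsRoot (p.set rv ((ru : Nat) : Int)) rv := by
          unfold pvIsRoot; rw [hstepq, if_pos rfl]; exact hequ
        rw [pvRoot_of_isRoot hq2, pvRoot_of_isRoot hr2, if_pos rfl, hequ]
      · have h1 : pvRoot (p.set rv ((ru : Nat) : Int)) rv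
            = pvRoot (p.set rv ((ru : Nat) : Int)) ru := by
          rw [← pvRoot_step hInvq (show rv < (p.set rv ((ru : Nat) : Int)).length by
            rw [hqlen]; exact hrv), hstepq, if_pos rfl]
        have h2 : pvIsRoot (p.set rv ((ru : Nat) : Int)) ru := by
          unfold pvIsRoot at *; rw [hstepq, if_neg hner]; exact hr1
        rw [h1, pvRoot_of_isRoot h2, pvRoot_of_isRoot hr2, if_pos rfl]
    · have hq : pvIsRoot (p.set rv ((ru : Nat) : Int)) a := by
        unfold pvIsRoot at *; rw [hstepq, if_neg hne]; exact hroot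
      rw [pvRoot_of_isRoot hq, pvRoot_of_isRoot hroot, if_neg hne]
  have key : ∀ m a, a < p.length → d a ≤ m →
      pvRoot (p.set rv ((ru : Nat) : Int)) a = if pvRoot p a = rv then ru else pvRoot p a := by
    intro m
    induction m with
    | zero =>
      intro a ha hda
      by_cases hroot : pvIsRoot p a
      · exact rootcase a ha hroot
      · rcases hd a ha with h' | h'
        · exact absurd h' hroot
        · omega
    | succ m ih =>
      intro a ha hda
      by_cases hroot : pvIsRoot p a
      · exact rootcase a ha hroot
      · have hne : a ≠ rv := by
          intro hcon; subst hcon; exact hroot hr2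
        have hdlt : d (pvStep p a) < d a := by
          rcases hd a ha with h' | h'
          · exact absurd h' hroot
          · exact h'
        have hslt : pvStep p a < p.length := (hb a ha).2
        have h1 : pvRoot (p.set rv ((ru : Nat) : Int)) a
            = pvRoot (p.set rv ((ru : Nat) : Int)) (pvStep p a) := by
          rw [← pvRoot_step hInvq (by rw [hqlen]; exact ha), hstepq, if_neg hne]
        rw [h1, ih _ hslt (by omega), pvRoot_step hInv ha]
  intro a ha
  exact key (d a) a ha (Nat.le_refl _)

-- find with fuel > k (k reaching the root) returns the root and only compresses
theorem pvGetD_irrel {p : List Int} {v : Nat} (hv : v < p.length) (d : Int) :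
    p.getD v d = p.getD v 0 := by
  simp [List.getD_eq_getElem?_getD, List.getElem?_eq_getElem hv]

theorem pvFind_spec {p : List Int} (h : pvInv p) {v : Nat} (hv : v < p.length)
    {k : Nat} (hk : pvIsRoot p ((pvStep p)^[k] v)) {fuel : Nat} (hfuel : k < fuel) :
    (pvFind fuel p (v : Int)).1 = ((pvRoot p v : Nat) : Int) ∧
    pvInv (pvFind fuel p (v : Int)).2 ∧
    (pvFind fuel p (v : Int)).2.length = p.length ∧
    (∀ a, a < p.length → pvRoot (pvFind fuel p (v : Int)).2 a = pvRoot p a) := by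
  induction k generalizing v fuel with
  | zero =>
    simp only [Function.iterate_zero, id_eq] at hk
    obtain ⟨f, rfl⟩ : ∃ f, fuel = f + 1 := ⟨fuel - 1, by omega⟩
    have hval : PySem.List.pyGetD p ((v : Nat) : Int) ((v : Nat) : Int) = ((v : Nat) : Int) := by
      rw [PySem.List.pyGetD_natCast, pvGetD_irrel hv]
      have h2 : ((pvStep p v : Nat) : Int) = p.getD v 0 := by
        unfold pvStep; rw [Int.toNat_of_nonneg (h.1 v hv).1]
      rw [← h2, hk]
    have heval : pvFind (f + 1) p ((v : Nat) : Int) = (((v : Nat) : Int), p) := by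
      simp only [pvFind, hval]
      simp
    rw [heval, pvRoot_of_isRoot hk]
    exact ⟨rfl, h, rfl, fun a _ => rfl⟩
  | succ k ih =>
    by_cases hroot : pvIsRoot p v
    · exact ih hv (by simpa [pvIter_fixed hroot] using hroot) (by omega)
    · obtain ⟨f, rfl⟩ : ∃ f, fuel = f + 1 := ⟨fuel - 1, by omega⟩
      have hnn : 0 ≤ p.getD v 0 := (h.1 v hv).1
      have hval : PySem.List.pyGetD p ((v : Nat) : Int) ((v : Nat) : Int)
          = ((pvStep p v : Nat) : Int) := by
        rw [PySem.List.pyGetD_natCast, pvGetD_irrel hv]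
        unfold pvStep; rw [Int.toNat_of_nonneg hnn]
      have hner : ((pvStep p v : Nat) : Int) ≠ ((v : Nat) : Int) := by
        intro hcon
        exact hroot (by exact_mod_cast hcon)
      have hk' : pvIsRoot p ((pvStep p)^[k] (pvStep p v)) := by
        rw [← Function.iterate_succ_apply]
        exact hk
      have hslt : pvStep p v < p.length := (h.1 v hv).2
      obtain ⟨ih1, ih2, ih3, ih4⟩ := ih hslt hk' (show k < f by omega)
      have hrootstep : pvRoot p (pvStep p v) = pvRoot p v := pvRoot_step h hv
      have hvq : v < (pvFind f p ((pvStep p v : Nat) : Int)).2.length := by rw [ih3]; exact hv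
      have hrq : pvRoot (pvFind f p ((pvStep p v : Nat) : Int)).2 v = pvRoot p v := ih4 v hv
      obtain ⟨hC1, hC2⟩ := pvSet_compress ih2 hvq
      have heval : pvFind (f + 1) p ((v : Nat) : Int)
          = (((pvRoot p v : Nat) : Int),
             (pvFind f p ((pvStep p v : Nat) : Int)).2.set v ((pvRoot p v : Nat) : Int)) := by
        simp only [pvFind, hval]
        rw [if_pos hner]
        simp only [ih1, PySem.List.pySetD_natCast, hrootstep]
        congr 1
        rw [PySem.List.pyGetD_natCast, pvGetD_irrel (by simpa using hvq), pvGetD_set (by simpa using hvq)]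
        simp
      rw [heval]
      rw [hrq] at hC1 hC2
      refine ⟨rfl, hC1, by simp [ih3], ?_⟩
      intro a ha
      rw [hC2 a (by rw [ih3]; exact ha), ih4 a ha]

theorem pvRank_zero (m : Nat) (x : Int) : PySem.List.pyGetD (List.replicate m (0:Int)) x 0 = 0 := by
  unfold PySem.List.pyGetD
  cases hx : PySem.List.pyGet? (List.replicate m (0:Int)) x with
  | none => rfl
  | some a =>
    have := PySem.List.mem_of_pyGet?_eq_some _ hx
    simp only [List.eq_of_mem_replicate this]
    rfl

theorem pvUnion_spec {p : List Int} (h : pvInv p) {u v : Nat}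
    (hu : u < p.length) (hv : v < p.length) (m : Nat) :
    pvInv (pvUnion (p.length + 1) (List.replicate m 0) p (u : Int) (v : Int)) ∧
    (pvUnion (p.length + 1) (List.replicate m 0) p (u : Int) (v : Int)).length = p.length ∧
    (∀ a, a < p.length →
      pvRoot (pvUnion (p.length + 1) (List.replicate m 0) p (u : Int) (v : Int)) a =
        if pvRoot p a = pvRoot p v then pvRoot p u else pvRoot p a) := by
  obtain ⟨k1, hk1, hr1⟩ := pvReach h.1 h.2.choose_spec hu
  obtain ⟨F11, F12, F13, F14⟩ := pvFind_spec h hu hr1 (show k1 < p.length + 1 by omega)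
  obtain ⟨k2, hk2, hr2⟩ := pvReach F12.1 F12.2.choose_spec (show v < (pvFind (p.length + 1) p ((u:Nat):Int)).2.length by rw [F13]; exact hv)
  obtain ⟨F21, F22, F23, F24⟩ := pvFind_spec F12 (show v < (pvFind (p.length + 1) p ((u:Nat):Int)).2.length by rw [F13]; exact hv) hr2
    (show k2 < p.length + 1 by rw [F13] at hk2; omega)
  have hq1v : pvRoot (pvFind (p.length + 1) p ((u:Nat):Int)).2 v = pvRoot p v := F14 v hv
  rw [hq1v] at F21
  have hlen2 : (pvFind (p.length + 1) (pvFind (p.length + 1) p ((u:Nat):Int)).2 ((v:Nat):Int)).2.length = p.length := by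
    rw [F23, F13]
  have hres : pvUnion (p.length + 1) (List.replicate m 0) p ((u:Nat):Int) ((v:Nat):Int)
      = (pvFind (p.length + 1) (pvFind (p.length + 1) p ((u:Nat):Int)).2 ((v:Nat):Int)).2.set
          (pvRoot p v) ((pvRoot p u : Nat) : Int) := by
    simp only [pvUnion, F11, F21, pvRank_zero]
    rw [if_true, PySem.List.pySetD_natCast]
  have hroots2 : ∀ a, a < p.length →
      pvRoot (pvFind (p.length + 1) (pvFind (p.length + 1) p ((u:Nat):Int)).2 ((v:Nat):Int)).2 a = pvRoot p a := by
    intro a ha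
    rw [F24 a (by rw [F13]; exact ha), F14 a ha]
  have hrulen : pvRoot p u < p.length := pvRoot_lt h hu
  have hrvlen : pvRoot p v < p.length := pvRoot_lt h hv
  have hruroot : pvIsRoot (pvFind (p.length + 1) (pvFind (p.length + 1) p ((u:Nat):Int)).2 ((v:Nat):Int)).2 (pvRoot p u) := by
    have h1 := pvRoot_isRoot F22 (show pvRoot p u < _ by rw [hlen2]; exact hrulen)
    rw [hroots2 _ hrulen, pvRoot_of_isRoot (pvRoot_isRoot h hu)] at h1
    exact h1
  have hrvroot : pvIsRoot (pvFind (p.length + 1) (pvFind (p.length + 1) p ((u:Nat):Int)).2 ((v:Nat):Int)).2 (pvRoot p v) := by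
    have h1 := pvRoot_isRoot F22 (show pvRoot p v < _ by rw [hlen2]; exact hrvlen)
    rw [hroots2 _ hrvlen, pvRoot_of_isRoot (pvRoot_isRoot h hv)] at h1
    exact h1
  obtain ⟨hJ1, hJ2⟩ := pvSet_join F22 (show pvRoot p u < _ by rw [hlen2]; exact hrulen)
    (show pvRoot p v < _ by rw [hlen2]; exact hrvlen) hruroot hrvroot
  rw [hres]
  refine ⟨hJ1, by simp [hlen2], ?_⟩
  intro a ha
  rw [hJ2 a (by rw [hlen2]; exact ha), hroots2 a ha]

-- ---- bridge invariant between A's forest and B's labelling ----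
def pvPack (n : Int) (p comp : List Int) (members : PySem.Dict Int (List Int)) : Prop :=
  pvInv p ∧ p.length = n.toNat ∧ comp.length = n.toNat ∧
  (∀ a b, a < n.toNat → b < n.toNat →
    (pvRoot p a = pvRoot p b ↔ comp.getD a 0 = comp.getD b 0)) ∧
  members.keys.Nodup ∧
  (∀ l : Int, l ∈ members.keys ↔ ∃ j, j < n.toNat ∧ comp.getD j 0 = l) ∧
  (∀ l x : Int, x ∈ members.getD l [] ↔ ∃ j, j < n.toNat ∧ ((j : Nat) : Int) = x ∧ comp.getD j 0 = l)

theorem pvCollapse {α : Type} [DecidableEq α] (x y w z : α) :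
    ((if x = w then z else x) = (if y = w then z else y)) ↔
      (x = y ∨ (x = w ∧ y = z) ∨ (x = z ∧ y = w)) := by
  by_cases h1 : x = w <;> by_cases h2 : y = w <;> subst_eqs <;> simp_all <;> tauto

-- dict erase lemmas (not in the prelude's book)
theorem pvFind?_filter_ne {k k' : Int} (hne : k' ≠ k) (items : List (Int × List Int)) :
    List.find? (fun p => p.1 == k') (items.filter (fun p => !(p.1 == k)))
      = List.find? (fun p => p.1 == k') items := by
  induction items with
  | nil => rfl
  | cons p rest ih =>
    by_cases h1 : p.1 = k
    · have h2 : p.1 ≠ k' := by rw [h1]; exact fun hc => hne hc.symm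
      rw [List.filter_cons_of_neg (by simp [h1]), ih, List.find?_cons_of_neg (by simp [h2])]
    · rw [List.filter_cons_of_pos (by simp [h1])]
      by_cases h2 : p.1 = k'
      · rw [List.find?_cons_of_pos (by simp [h2]), List.find?_cons_of_pos (by simp [h2])]
      · rw [List.find?_cons_of_neg (by simp [h2]), List.find?_cons_of_neg (by simp [h2]), ih]

theorem pvDict_get?_erase (d : PySem.Dict Int (List Int)) (k k' : Int) :
    (d.erase k).get? k' = if k' = k then none else d.get? k' := by
  obtain ⟨items⟩ := d
  simp only [PySem.Dict.erase, PySem.Dict.get?]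
  rcases eq_or_ne k' k with rfl | hne
  · rw [if_pos rfl, List.find?_eq_none.mpr, Option.map_none]
    intro x hx
    have := (List.mem_filter.mp hx).2
    simp at this ⊢
    exact this
  · rw [if_neg hne]
    congr 1
    exact pvFind?_filter_ne hne items

theorem pvDict_getD_erase (d : PySem.Dict Int (List Int)) (k k' : Int) (d0 : List Int) :
    (d.erase k).getD k' d0 = if k' = k then d0 else d.getD k' d0 := by
  simp only [PySem.Dict.getD, pvDict_get?_erase]
  split <;> rfl

theorem pvDict_keys_erase (d : PySem.Dict Int (List Int)) (k : Int) :
    (d.erase k).keys = d.keys.filter (fun x => !(x == k)) := by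
  simp only [PySem.Dict.erase, PySem.Dict.keys, List.filter_map]
  rfl

theorem pvDict_mem_keys_erase (d : PySem.Dict Int (List Int)) (k x : Int) :
    x ∈ (d.erase k).keys ↔ x ∈ d.keys ∧ x ≠ k := by
  simp [pvDict_keys_erase, List.mem_filter]

theorem pvDict_contains_erase (d : PySem.Dict Int (List Int)) (k k' : Int) :
    (d.erase k).contains k' = true ↔ k' ∈ d.keys ∧ k' ≠ k := by
  rw [PySem.Dict.contains_iff_mem_keys, pvDict_mem_keys_erase]

theorem pvRelabel (c1 : Int) : ∀ (moved : List Int) (comp : List Int),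
    (∀ x ∈ moved, 0 ≤ x) →
    (moved.foldl (fun cmp x => PySem.List.pySetD cmp x c1) comp).length = comp.length ∧
    ∀ j, j < comp.length →
      (moved.foldl (fun cmp x => PySem.List.pySetD cmp x c1) comp).getD j 0
        = if ((j : Nat) : Int) ∈ moved then c1 else comp.getD j 0 := by
  intro moved
  induction moved with
  | nil => intro comp _; exact ⟨rfl, fun j hj => by simp⟩
  | cons x xs ih =>
    intro comp hnn
    have hx0 : 0 ≤ x := hnn x List.mem_cons_self
    have hxs : ∀ y ∈ xs, 0 ≤ y := fun y hy => hnn y (List.mem_cons_of_mem _ hy)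
    have hfold : (x :: xs).foldl (fun cmp y => PySem.List.pySetD cmp y c1) comp
        = xs.foldl (fun cmp y => PySem.List.pySetD cmp y c1) (comp.set x.toNat c1) := by
      rw [List.foldl_cons, PySem.List.pySetD_of_nonneg _ _ hx0]
    obtain ⟨ihl, ihg⟩ := ih (comp.set x.toNat c1) hxs
    rw [List.length_set] at ihl
    refine ⟨by rw [hfold, ihl], ?_⟩
    intro j hj
    rw [hfold, ihg j (by rw [List.length_set]; exact hj)]
    by_cases hmem : ((j : Nat) : Int) ∈ xs
    · simp [hmem]
    · by_cases hjx : ((j : Nat) : Int) = x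
      · have hjx' : j = x.toNat := by omega
        subst hjx'
        rw [pvGetD_set hj]
        simp [hmem, hjx]
      · have hjx' : j ≠ x.toNat := by omega
        by_cases hxr : x.toNat < comp.length
        · rw [pvGetD_set hxr]
          simp [hmem, hjx, hjx']
        · rw [List.set_eq_of_length_le (by omega)]
          simp [hmem, hjx]

theorem pvStay_pack {n : Int} {p comp : List Int} {members : PySem.Dict Int (List Int)}
    (hP : pvPack n p comp members) {u v : Nat}
    (hu : u < n.toNat) (hv : v < n.toNat)
    (hcc : comp.getD u 0 = comp.getD v 0) :
    pvPack n (pvUnion (p.length + 1) (List.replicate n.toNat 0) p ((u : Nat) : Int) ((v : Nat) : Int))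
      comp members := by
  obtain ⟨hInv, hplen, hclen, hrel, hnd, hkeys, hmem⟩ := hP
  obtain ⟨U1, U2, U3⟩ := pvUnion_spec hInv (show u < p.length by omega) (show v < p.length by omega) n.toNat
  have hre : pvRoot p u = pvRoot p v := (hrel u v (by omega) (by omega)).mpr hcc
  have hroots : ∀ a, a < n.toNat → pvRoot (pvUnion (p.length + 1) (List.replicate n.toNat 0) p ((u : Nat) : Int) ((v : Nat) : Int)) a = pvRoot p a := by
    intro a ha
    rw [U3 a (by omega)]
    split
    · rename_i h'
      rw [h', hre]
    · rfl
  refine ⟨U1, by omega, hclen, ?_, hnd, hkeys, hmem⟩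
  intro a b ha hb
  rw [hroots a ha, hroots b hb]
  exact hrel a b ha hb

set_option maxHeartbeats 1600000 in
theorem pvMerge_pack {n : Int} {p comp : List Int} {members : PySem.Dict Int (List Int)}
    (hP : pvPack n p comp members) {u v : Nat}
    (hu : u < n.toNat) (hv : v < n.toNat) {c1 c2 : Int}
    (hor : (c1 = comp.getD u 0 ∧ c2 = comp.getD v 0) ∨ (c1 = comp.getD v 0 ∧ c2 = comp.getD u 0))
    (hcc : comp.getD u 0 ≠ comp.getD v 0) :
    pvPack n (pvUnion (p.length + 1) (List.replicate n.toNat 0) p ((u : Nat) : Int) ((v : Nat) : Int))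
      ((members.getD c2 []).foldl (fun cmp x => PySem.List.pySetD cmp x c1) comp)
      ((members.erase c2).modify c1 [] (· ++ (members.getD c2 []))) := by
  obtain ⟨hInv, hplen, hclen, hrel, hnd, hkeys, hmem⟩ := hP
  obtain ⟨U1, U2, U3⟩ := pvUnion_spec hInv (show u < p.length by omega) (show v < p.length by omega) n.toNat
  have hc1c2 : c1 ≠ c2 := by
    rcases hor with ⟨rfl, rfl⟩ | ⟨rfl, rfl⟩
    · exact hcc
    · exact fun h' => hcc h'.symm
  have hmoved : ∀ x, (x ∈ members.getD c2 [] ↔ ∃ j, j < n.toNat ∧ ((j : Nat) : Int) = x ∧ comp.getD j 0 = c2) :=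
    fun x => hmem c2 x
  have hmnn : ∀ x ∈ members.getD c2 [], 0 ≤ x := by
    intro x hx
    obtain ⟨j, _, rfl, _⟩ := (hmoved x).mp hx
    exact Int.natCast_nonneg j
  obtain ⟨Rlen, Rget⟩ := pvRelabel c1 (members.getD c2 []) comp hmnn
  have hcomp1 : ∀ j, j < n.toNat →
      ((members.getD c2 []).foldl (fun cmp x => PySem.List.pySetD cmp x c1) comp).getD j 0
        = if comp.getD j 0 = c2 then c1 else comp.getD j 0 := by
    intro j hj
    rw [Rget j (by omega)]
    congr 1
    simp only [eq_iff_iff]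
    constructor
    · intro hx
      obtain ⟨j', _, hj', hc⟩ := (hmoved _).mp hx
      have : j' = j := by exact_mod_cast hj'
      rw [← this]; exact hc
    · intro hc
      exact (hmoved _).mpr ⟨j, hj, rfl, hc⟩
  have hc1wit : ∃ j, j < n.toNat ∧ comp.getD j 0 = c1 := by
    rcases hor with ⟨rfl, _⟩ | ⟨rfl, _⟩
    · exact ⟨u, hu, rfl⟩
    · exact ⟨v, hv, rfl⟩
  have hc1keys : c1 ∈ members.keys := (hkeys c1).mpr hc1wit
  have hcont : (members.erase c2).contains c1 = true :=
    (pvDict_contains_erase members c2 c1).mpr ⟨hc1keys, hc1c2⟩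
  have hkeq : ((members.erase c2).modify c1 [] (· ++ (members.getD c2 []))).keys
      = (members.erase c2).keys := by
    rw [PySem.Dict.keys_modify, PySem.Dict.keys_insert_of_contains _ _ hcont]
  have hgetD : ∀ l : Int, ((members.erase c2).modify c1 [] (· ++ (members.getD c2 []))).getD l []
      = if l = c1 then members.getD c1 [] ++ members.getD c2 []
        else if l = c2 then [] else members.getD l [] := by
    intro l
    rw [PySem.Dict.getD_modify]
    rcases eq_or_ne l c1 with rfl | h1
    · rw [if_pos rfl, if_pos rfl, pvDict_getD_erase, if_neg hc1c2]
    · rw [if_neg h1, if_neg h1, pvDict_getD_erase]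
  refine ⟨U1, by omega, by rw [Rlen]; exact hclen, ?_, ?_, ?_, ?_⟩
  · -- relation
    intro a b ha hb
    have t1 := hrel a b ha hb
    have t2 := hrel a v ha (by omega)
    have t3 := hrel a u ha (by omega)
    have t4 := hrel b v hb (by omega)
    have t5 := hrel b u hb (by omega)
    rw [U3 a (by omega), U3 b (by omega), hcomp1 a ha, hcomp1 b hb,
      pvCollapse, pvCollapse]
    rcases hor with ⟨rfl, rfl⟩ | ⟨rfl, rfl⟩ <;> tauto
  · -- nodup keys
    rw [hkeq, pvDict_keys_erase]
    exact hnd.filter _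
  · -- keys membership
    intro l
    rw [hkeq, pvDict_mem_keys_erase]
    constructor
    · rintro ⟨hlk, hlne⟩
      obtain ⟨j, hj, hcj⟩ := (hkeys l).mp hlk
      refine ⟨j, hj, ?_⟩
      rw [hcomp1 j hj, hcj, if_neg hlne]
    · rintro ⟨j, hj, hcj⟩
      rw [hcomp1 j hj] at hcj
      by_cases h' : comp.getD j 0 = c2
      · rw [if_pos h'] at hcj
        subst hcj
        exact ⟨hc1keys, hc1c2⟩
      · rw [if_neg h'] at hcj
        subst hcj
        exact ⟨(hkeys _).mpr ⟨j, hj, rfl⟩, h'⟩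
  · -- member lists
    intro l x
    rw [hgetD l]
    rcases eq_or_ne l c1 with rfl | h1
    · rw [if_pos rfl]
      rw [List.mem_append]
      constructor
      · rintro (hx | hx)
        · obtain ⟨j, hj, rfl, hcj⟩ := (hmem l x).mp hx
          exact ⟨j, hj, rfl, by rw [hcomp1 j hj, hcj, if_neg hc1c2]⟩
        · obtain ⟨j, hj, rfl, hcj⟩ := (hmoved x).mp hx
          exact ⟨j, hj, rfl, by rw [hcomp1 j hj, hcj, if_pos rfl]⟩
      · rintro ⟨j, hj, rfl, hcj⟩
        rw [hcomp1 j hj] at hcj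
        by_cases h' : comp.getD j 0 = c2
        · exact Or.inr ((hmoved _).mpr ⟨j, hj, rfl, h'⟩)
        · rw [if_neg h'] at hcj
          exact Or.inl ((hmem _ _).mpr ⟨j, hj, rfl, hcj⟩)
    · rw [if_neg h1]
      rcases eq_or_ne l c2 with rfl | h2
      · rw [if_pos rfl]
        simp only [List.not_mem_nil, false_iff]
        rintro ⟨j, hj, rfl, hcj⟩
        rw [hcomp1 j hj] at hcj
        by_cases h' : comp.getD j 0 = l
        · rw [if_pos h'] at hcj
          exact h1 hcj.symm
        · rw [if_neg h'] at hcj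
          exact h' hcj
      · rw [if_neg h2]
        constructor
        · intro hx
          obtain ⟨j, hj, rfl, hcj⟩ := (hmem l x).mp hx
          exact ⟨j, hj, rfl, by rw [hcomp1 j hj, hcj, if_neg h2]⟩
        · rintro ⟨j, hj, rfl, hcj⟩
          rw [hcomp1 j hj] at hcj
          by_cases h' : comp.getD j 0 = c2
          · rw [if_pos h'] at hcj
            exact absurd hcj.symm h1
          · rw [if_neg h'] at hcj
            exact (hmem _ _).mpr ⟨j, hj, rfl, hcj⟩

theorem pvStep_pack {n : Int} {p comp : List Int} {members : PySem.Dict Int (List Int)}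
    (hP : pvPack n p comp members) {u v : Int}
    (hu0 : 0 ≤ u) (hun : u < n) (hv0 : 0 ≤ v) (hvn : v < n) :
    pvPack n (pvUnion (p.length + 1) (List.replicate n.toNat 0) p u v)
      (let cu := PySem.List.pyGetD comp u 0
       let cv := PySem.List.pyGetD comp v 0
       if cu ≠ cv then
         let lcu := members.getD cu []
         let lcv := members.getD cv []
         let pr := if lcu.length < lcv.length then (cv, cu) else (cu, cv)
         let moved := members.getD pr.2 []
         moved.foldl (fun cmp x => PySem.List.pySetD cmp x pr.1) comp
       else comp)
      (let cu := PySem.List.pyGetD comp u 0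
       let cv := PySem.List.pyGetD comp v 0
       if cu ≠ cv then
         let lcu := members.getD cu []
         let lcv := members.getD cv []
         let pr := if lcu.length < lcv.length then (cv, cu) else (cu, cv)
         let moved := members.getD pr.2 []
         (members.erase pr.2).modify pr.1 [] (· ++ moved)
       else members) := by
  have hgu : PySem.List.pyGetD comp u 0 = comp.getD u.toNat 0 :=
    PySem.List.pyGetD_of_nonneg comp 0 hu0
  have hgv : PySem.List.pyGetD comp v 0 = comp.getD v.toNat 0 :=
    PySem.List.pyGetD_of_nonneg comp 0 hv0
  have hcu : u = ((u.toNat : Nat) : Int) := (Int.toNat_of_nonneg hu0).symm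
  have hcv : v = ((v.toNat : Nat) : Int) := (Int.toNat_of_nonneg hv0).symm
  have hun' : u.toNat < n.toNat := by omega
  have hvn' : v.toNat < n.toNat := by omega
  simp only [hgu, hgv]
  by_cases hcc : comp.getD u.toNat 0 = comp.getD v.toNat 0
  · rw [if_neg (not_not_intro hcc), if_neg (not_not_intro hcc)]
    have hstep := pvStay_pack hP hun' hvn' hcc
    rw [← hcu, ← hcv] at hstep
    exact hstep
  · by_cases hsz : (members.getD (comp.getD u.toNat 0) []).length
        < (members.getD (comp.getD v.toNat 0) []).length
    · rw [if_pos hcc, if_pos hcc, if_pos hsz]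
      have hstep := pvMerge_pack hP hun' hvn' (Or.inr ⟨rfl, rfl⟩) hcc
      rw [← hcu, ← hcv] at hstep
      exact hstep
    · rw [if_pos hcc, if_pos hcc, if_neg hsz]
      have hstep := pvMerge_pack hP hun' hvn' (Or.inl ⟨rfl, rfl⟩) hcc
      rw [← hcu, ← hcv] at hstep
      exact hstep

theorem pvFold_pack {n : Int} (cs : List (List Int))
    (hcs : ∀ c ∈ cs, c.length = 2 ∧ ∀ x ∈ c, 0 ≤ x ∧ x < n)
    {p comp : List Int} {members : PySem.Dict Int (List Int)} (hP : pvPack n p comp members) :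
    pvPack n
      (cs.foldl (fun p c =>
        pvUnion (p.length + 1) (List.replicate n.toNat 0) p
          (PySem.List.pyGetD c 0 0) (PySem.List.pyGetD c 1 0)) p)
      (cs.foldl pvAltStep (comp, members)).1
      (cs.foldl pvAltStep (comp, members)).2 := by
  induction cs generalizing p comp members with
  | nil => exact hP
  | cons c cs ih =>
    obtain ⟨hc2, hcb⟩ := hcs c List.mem_cons_self
    obtain ⟨x0, x1, rfl⟩ := List.length_eq_two.mp hc2
    have hx0 := hcb x0 (by simp)
    have hx1 := hcb x1 (by simp)
    have hg0 : PySem.List.pyGetD [x0, x1] 0 0 = x0 := PySem.List.pyGetD_zero_cons x0 [x1] 0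
    have hg1 : PySem.List.pyGetD [x0, x1] 1 0 = x1 := by simp [pysem]
    rw [List.foldl_cons, List.foldl_cons]
    have hstep := pvStep_pack (u := x0) (v := x1) hP hx0.1 hx0.2 hx1.1 hx1.2
    rw [hg0, hg1]
    have hB : pvAltStep (comp, members) [x0, x1]
        = ((let cu := PySem.List.pyGetD comp x0 0
            let cv := PySem.List.pyGetD comp x1 0
            if cu ≠ cv then
              let lcu := members.getD cu []
              let lcv := members.getD cv []
              let pr := if lcu.length < lcv.length then (cv, cu) else (cu, cv)
              let moved := members.getD pr.2 []
              moved.foldl (fun cmp x => PySem.List.pySetD cmp x pr.1) comp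
            else comp),
           (let cu := PySem.List.pyGetD comp x0 0
            let cv := PySem.List.pyGetD comp x1 0
            if cu ≠ cv then
              let lcu := members.getD cu []
              let lcv := members.getD cv []
              let pr := if lcu.length < lcv.length then (cv, cu) else (cu, cv)
              let moved := members.getD pr.2 []
              (members.erase pr.2).modify pr.1 [] (· ++ moved)
            else members)) := by
      simp only [pvAltStep, hg0, hg1]
      split
      · rfl
      · rfl
    rw [hB]
    exact ih (fun c hc => hcs c (List.mem_cons_of_mem _ hc)) hstep

-- ---- A's final counting loop ----
theorem pvCollect (l : List Int) :
    ∀ (s : PySem.Set Int) (p : List Int), pvInv p →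
    (∀ x ∈ l, 0 ≤ x ∧ x.toNat < p.length) →
    (l.foldl pvFindStep (s, p)).1
      = PySem.Set.update s (l.map (fun x => ((pvRoot p x.toNat : Nat) : Int))) := by
  induction l with
  | nil =>
    intro s p _ _
    simp [PySem.Set.update_nil]
  | cons x l ih =>
    intro s p hInv hb
    obtain ⟨hx0, hx1⟩ := hb x List.mem_cons_self
    obtain ⟨k, hk, hr⟩ := pvReach hInv.1 hInv.2.choose_spec hx1
    have hxc : x = ((x.toNat : Nat) : Int) := (Int.toNat_of_nonneg hx0).symm
    obtain ⟨F1, F2, F3, F4⟩ := pvFind_spec hInv hx1 hr (show k < p.length + 1 by omega)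
    rw [← hxc] at F1 F2 F3 F4
    rw [List.foldl_cons]
    have hbody : pvFindStep (s, p) x
        = (PySem.Set.add s ((pvRoot p x.toNat : Nat) : Int), (pvFind (p.length + 1) p x).2) := by
      simp only [pvFindStep, F1]
    have hmap : List.map (fun y => ((pvRoot (pvFind (p.length + 1) p x).2 y.toNat : Nat) : Int)) l
        = List.map (fun y => ((pvRoot p y.toNat : Nat) : Int)) l :=
      List.map_congr_left (fun y hy => by
        rw [F4 y.toNat (hb y (List.mem_cons_of_mem _ hy)).2])
    rw [hbody, ih _ _ F2 (fun y hy => ⟨(hb y (List.mem_cons_of_mem _ hy)).1,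
      by rw [F3]; exact (hb y (List.mem_cons_of_mem _ hy)).2⟩), hmap,
      List.map_cons, ← PySem.Set.update_cons]

-- ---- counting distinct values of two functions with the same equality kernel ----
theorem pvCountAux {α β γ : Type} [DecidableEq β] [DecidableEq γ] (f : α → β) (g : α → γ) :
    ∀ (l : List α) (s1 : PySem.Set β) (s2 : PySem.Set γ),
    (∀ a ∈ l, (f a ∈ s1 ↔ g a ∈ s2)) →
    (∀ a ∈ l, ∀ b ∈ l, (f a = f b ↔ g a = g b)) →
    s1.length = s2.length →
    (l.foldl (fun s x => PySem.Set.add s (f x)) s1).length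
      = (l.foldl (fun s x => PySem.Set.add s (g x)) s2).length := by
  intro l
  induction l with
  | nil => intro s1 s2 _ _ h12; exact h12
  | cons a l ih =>
    intro s1 s2 hmemiff hker h12
    rw [List.foldl_cons, List.foldl_cons]
    by_cases hfa : f a ∈ s1
    · have hga : g a ∈ s2 := (hmemiff a List.mem_cons_self).mp hfa
      rw [PySem.Set.add_of_mem hfa, PySem.Set.add_of_mem hga]
      exact ih _ _ (fun b hb => hmemiff b (List.mem_cons_of_mem _ hb))
        (fun b hb c hc => hker b (List.mem_cons_of_mem _ hb) c (List.mem_cons_of_mem _ hc)) h12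
    · have hga : g a ∉ s2 := fun hg' => hfa ((hmemiff a List.mem_cons_self).mpr hg')
      rw [PySem.Set.add_of_not_mem hfa, PySem.Set.add_of_not_mem hga]
      refine ih _ _ ?_ (fun b hb c hc => hker b (List.mem_cons_of_mem _ hb) c (List.mem_cons_of_mem _ hc))
        (by simp [h12])
      intro b hb
      simp only [List.mem_append, List.mem_singleton]
      constructor
      · rintro (h' | h')
        · exact Or.inl ((hmemiff b (List.mem_cons_of_mem _ hb)).mp h')
        · exact Or.inr ((hker b (List.mem_cons_of_mem _ hb) a List.mem_cons_self).mp h')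
      · rintro (h' | h')
        · exact Or.inl ((hmemiff b (List.mem_cons_of_mem _ hb)).mpr h')
        · exact Or.inr ((hker b (List.mem_cons_of_mem _ hb) a List.mem_cons_self).mpr h')

-- ===== VERDICT (by name: the statement is the Claim_ definition above) =====
theorem makeConnectedUsingUnionFind_spec : Claim_equal_makeConnectedUsingUnionFind := by
  intro n connections hDom hPre
  unfold Spec_makeConnectedUsingUnionFind
  by_cases hg : PySem.List.len connections < n - 1
  · unfold makeConnectedUsingUnionFind makeConnectedUsingUnionFind_alt
    rw [if_pos hg, if_pos hg]
  · have hPre' : ∀ c ∈ connections, c.length = 2 ∧ ∀ x ∈ c, 0 ≤ x ∧ x < n :=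
      hPre.resolve_left hg
    -- the two initial states form a pack
    have hplen : (PySem.List.pyRange 0 n 1).length = n.toNat := by
      rw [PySem.List.length_pyRange_one]; simp
    have hget0 : ∀ j, j < n.toNat → (PySem.List.pyRange 0 n 1).getD j 0 = ((j : Nat) : Int) := by
      intro j hj
      rw [PySem.List.pyRange_zero, PySem.List.getD_map_range _ _ _ _ hj]
    have hroot0 : ∀ j, j < n.toNat → pvIsRoot (PySem.List.pyRange 0 n 1) j := by
      intro j hj
      unfold pvIsRoot pvStep
      rw [hget0 j hj]
      simp
    have hInv0 : pvInv (PySem.List.pyRange 0 n 1) := by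
      refine ⟨?_, fun _ => 0, ?_⟩
      · intro j hj
        rw [hplen] at hj
        refine ⟨by rw [hget0 j hj]; exact Int.natCast_nonneg j, ?_⟩
        rw [show pvStep (PySem.List.pyRange 0 n 1) j = j from hroot0 j hj, hplen]
        exact hj
      · intro j hj
        rw [hplen] at hj
        exact Or.inl (hroot0 j hj)
    have hroot0' : ∀ j, j < n.toNat → pvRoot (PySem.List.pyRange 0 n 1) j = j :=
      fun j hj => pvRoot_of_isRoot (hroot0 j hj)
    have hitems : ((PySem.List.pyRange 0 n 1).foldl (fun d i => d.insert i [i]) PySem.Dict.empty).items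
        = (PySem.List.pyRange 0 n 1).map (fun a => (a, [a])) := by
      have := PySem.Dict.items_foldl_insert_fresh (PySem.List.pyRange 0 n 1)
        (fun a => a) (fun a => [a]) PySem.Dict.empty
        (fun a _ => PySem.Dict.contains_empty a)
        (by simpa using PySem.List.nodup_pyRange_one 0 n)
      simpa using this
    have hkeys0 : ((PySem.List.pyRange 0 n 1).foldl (fun d i => d.insert i [i]) PySem.Dict.empty).keys
        = PySem.List.pyRange 0 n 1 := by
      simp [PySem.Dict.keys, hitems, List.map_map, Function.comp_def]
    have hnd0 : ((PySem.List.pyRange 0 n 1).foldl (fun d i => d.insert i [i]) PySem.Dict.empty).keys.Nodup := by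
      rw [hkeys0]; exact PySem.List.nodup_pyRange_one 0 n
    have hgetd0 : ∀ l : Int, 0 ≤ l → l < n →
        ((PySem.List.pyRange 0 n 1).foldl (fun d i => d.insert i [i]) PySem.Dict.empty).getD l [] = [l] := by
      intro l h0 h1
      have hmem : (l, [l]) ∈ ((PySem.List.pyRange 0 n 1).foldl (fun d i => d.insert i [i]) PySem.Dict.empty).items := by
        rw [hitems]
        exact List.mem_map.mpr ⟨l, PySem.List.mem_pyRange_one.mpr ⟨h0, h1⟩, rfl⟩
      rw [PySem.Dict.getD, PySem.Dict.get?_of_mem_items _ hmem hnd0]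
      rfl
    have hgetd0' : ∀ l : Int, ¬(0 ≤ l ∧ l < n) →
        ((PySem.List.pyRange 0 n 1).foldl (fun d i => d.insert i [i]) PySem.Dict.empty).getD l [] = [] := by
      intro l hl
      refine PySem.Dict.getD_of_not_contains _ _ ?_
      rw [← Bool.not_eq_true, PySem.Dict.contains_iff_mem_keys, hkeys0]
      intro hmem
      exact hl (PySem.List.mem_pyRange_one.mp hmem)
    have P0 : pvPack n (PySem.List.pyRange 0 n 1) (PySem.List.pyRange 0 n 1)
        ((PySem.List.pyRange 0 n 1).foldl (fun d i => d.insert i [i]) PySem.Dict.empty) := by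
      refine ⟨hInv0, hplen, hplen, ?_, hnd0, ?_, ?_⟩
      · intro a b ha hb
        rw [hroot0' a ha, hroot0' b hb, hget0 a ha, hget0 b hb]
        constructor
        · intro h'; rw [h']
        · intro h'; exact_mod_cast h'
      · intro l
        rw [hkeys0, PySem.List.mem_pyRange_one]
        constructor
        · rintro ⟨h0, h1⟩
          exact ⟨l.toNat, by omega, by rw [hget0 l.toNat (by omega)]; omega⟩
        · rintro ⟨j, hj, hc⟩
          rw [hget0 j hj] at hc
          omega
      · intro l x
        by_cases hl : 0 ≤ l ∧ l < n
        · rw [hgetd0 l hl.1 hl.2, List.mem_singleton]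
          constructor
          · rintro rfl
            exact ⟨x.toNat, by omega, by omega, by rw [hget0 x.toNat (by omega)]; omega⟩
          · rintro ⟨j, hj, rfl, hc⟩
            rw [hget0 j hj] at hc
            exact hc
        · rw [hgetd0' l hl]
          simp only [List.not_mem_nil, false_iff]
          rintro ⟨j, hj, rfl, hc⟩
          rw [hget0 j hj] at hc
          omega
    obtain ⟨hInvF, hplenF, hclenF, hrelF, hndF, hkeysF, hmemF⟩ := pvFold_pack connections hPre' P0
    set pA := connections.foldl (fun p c =>
        pvUnion (p.length + 1) (List.replicate n.toNat 0) p
          (PySem.List.pyGetD c 0 0) (PySem.List.pyGetD c 1 0)) (PySem.List.pyRange 0 n 1) with hpAdef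
    set stB := connections.foldl pvAltStep (PySem.List.pyRange 0 n 1,
        (PySem.List.pyRange 0 n 1).foldl (fun d i => d.insert i [i]) PySem.Dict.empty) with hstBdef
    have hA : makeConnectedUsingUnionFind n connections
        = ((((PySem.List.pyRange 0 n 1).foldl pvFindStep (PySem.Set.empty, pA)).1.length : Int)) - 1 := by
      unfold makeConnectedUsingUnionFind
      rw [if_neg hg]
    have hB : makeConnectedUsingUnionFind_alt n connections = ((stB.2.size : Int)) - 1 := by
      unfold makeConnectedUsingUnionFind_alt
      rw [if_neg hg]
    rw [hA, hB]
    have hboundsF : ∀ x ∈ PySem.List.pyRange 0 n 1, 0 ≤ x ∧ x.toNat < pA.length := by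
      intro x hx
      obtain ⟨h0, h1⟩ := PySem.List.mem_pyRange_one.mp hx
      exact ⟨h0, by omega⟩
    rw [pvCollect (PySem.List.pyRange 0 n 1) PySem.Set.empty pA hInvF hboundsF,
      PySem.Set.update_empty]
    have hker : ∀ a ∈ PySem.List.pyRange 0 n 1, ∀ b ∈ PySem.List.pyRange 0 n 1,
        (((pvRoot pA a.toNat : Nat) : Int) = ((pvRoot pA b.toNat : Nat) : Int)
          ↔ stB.1.getD a.toNat 0 = stB.1.getD b.toNat 0) := by
      intro a ha b hb
      obtain ⟨ha0, ha1⟩ := PySem.List.mem_pyRange_one.mp ha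
      obtain ⟨hb0, hb1⟩ := PySem.List.mem_pyRange_one.mp hb
      rw [Int.natCast_inj]
      exact hrelF a.toNat b.toNat (by omega) (by omega)
    have hcount : (PySem.Set.ofList ((PySem.List.pyRange 0 n 1).map
          (fun x => ((pvRoot pA x.toNat : Nat) : Int)))).length
        = (PySem.Set.ofList ((PySem.List.pyRange 0 n 1).map
            (fun x => stB.1.getD x.toNat 0))).length := by
      rw [PySem.Set.ofList_eq_foldl, PySem.Set.ofList_eq_foldl, List.foldl_map, List.foldl_map]
      exact pvCountAux _ _ (PySem.List.pyRange 0 n 1) [] []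
        (by intro a _; simp) hker rfl
    rw [hcount]
    have hmembers : ∀ l' : Int, l' ∈ stB.2.keys ↔
        l' ∈ PySem.Set.ofList ((PySem.List.pyRange 0 n 1).map (fun x => stB.1.getD x.toNat 0)) := by
      intro l'
      rw [PySem.Set.mem_ofList, List.mem_map, hkeysF l']
      constructor
      · rintro ⟨j, hj, hc⟩
        refine ⟨((j : Nat) : Int), PySem.List.mem_pyRange_one.mpr ⟨by omega, by omega⟩, ?_⟩
        simpa using hc
      · rintro ⟨x, hx, hc⟩
        obtain ⟨h0, h1⟩ := PySem.List.mem_pyRange_one.mp hx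
        exact ⟨x.toNat, by omega, hc⟩
    have hperm := (List.perm_ext_iff_of_nodup hndF (PySem.Set.nodup_ofList _)).mpr hmembers
    rw [← hperm.length_eq]
    have hsz : stB.2.size = stB.2.keys.length := by
      simp [PySem.Dict.size, PySem.Dict.keys]
    rw [hsz]
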